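-- pv_equiv track=rewrite | github.com/EhsanGharibNezhad/TelescopeML | telescopeML/StatVisAnalyzer.py | find_nearest_top_bottom
-- ===== SOURCE A (Python) =====
-- def find_nearest_top_bottom(value, lst):
--     lst.sort()
--     nearest_top = None
--     nearest_bottom = None
--
--     for num in lst:
--         if num >= value:
--             nearest_top = num
--             break
--
--     if nearest_top is None:
--         nearest_top = lst[-1]
--
--     for num in reversed(lst):
--         if num <= value:
--             nearest_bottom = num
--             break
--
--     if nearest_bottom is None:
--         nearest_bottom = lst[0]
--
--     return nearest_bottom, nearest_top
-- ===== SOURCE B (Python) =====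
-- def find_nearest_top_bottom(value, lst):
--     top = None     # smallest element >= value
--     bottom = None  # largest element <= value
--     lo = None      # global min
--     hi = None      # global max
--     for num in lst:
--         if lo is None or num < lo:
--             lo = num
--         if hi is None or num > hi:
--             hi = num
--         if num >= value and (top is None or num < top):
--             top = num
--         if num <= value and (bottom is None or num > bottom):
--             bottom = num
--     if top is None:
--         top = hi
--     if bottom is None:
--         bottom = lo
--     return bottom, top
-- ===== Notes on version B (the rewrite author's own statement) =====
-- stated objective: alternative
-- what changed: replaced sort-then-scan (plus a reversed scan) by one linear pass tracking min-of-ge, max-of-le and the global min/max; B also does not mutate lst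
import Mathlib
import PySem

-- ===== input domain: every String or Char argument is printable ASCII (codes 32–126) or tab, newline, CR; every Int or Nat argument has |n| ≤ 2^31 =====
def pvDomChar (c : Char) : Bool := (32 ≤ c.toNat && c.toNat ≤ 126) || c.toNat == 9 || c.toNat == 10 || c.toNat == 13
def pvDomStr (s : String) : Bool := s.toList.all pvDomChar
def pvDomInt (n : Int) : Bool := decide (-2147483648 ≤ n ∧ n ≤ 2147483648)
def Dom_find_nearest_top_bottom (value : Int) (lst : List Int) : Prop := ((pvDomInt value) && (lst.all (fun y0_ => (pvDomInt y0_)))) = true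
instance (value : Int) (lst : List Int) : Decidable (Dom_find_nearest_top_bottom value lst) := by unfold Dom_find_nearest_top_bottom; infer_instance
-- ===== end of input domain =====

-- B replaces A's sort-then-scan by one linear pass tracking min-of-ge / max-of-le / global min & max (alternative algorithm).
-- A sorts lst in place (observable mutation); B does not mutate it — the equivalence proved is about the RETURN value.


-- ===== PORT A =====
-- 'for num in lst: if num >= value: nearest_top = num; break' (None if the loop falls through)
def findGeA (value : Int) : List Int → Option Int
  | [] => none
  | num :: t => if num ≥ value then some num else findGeA value t

-- 'for num in reversed(lst): if num <= value: nearest_bottom = num; break'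
def findLeA (value : Int) : List Int → Option Int
  | [] => none
  | num :: t => if num ≤ value then some num else findLeA value t

def find_nearest_top_bottom (value : Int) (lst : List Int) : Int × Int :=
  let s := PySem.List.sorted lst (fun x => x) false
  let nearest_top : Int :=
    match findGeA value s with
    | some n => n
    | none => PySem.List.pyGetD s (-1) 0   -- lst[-1]; Pre_ gives lst ≠ []
  let nearest_bottom : Int :=
    match findLeA value s.reverse with
    | some n => n
    | none => PySem.List.pyGetD s 0 0      -- lst[0]
  (nearest_bottom, nearest_top)

-- ===== PORT B =====
-- state = (top, bottom, lo, hi); one loop body of Source B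
def stepB (value : Int) (st : Option Int × Option Int × Option Int × Option Int) (num : Int) :
    Option Int × Option Int × Option Int × Option Int :=
  let (top, bottom, lo, hi) := st
  let lo := match lo with
    | none => some num
    | some l => if num < l then some num else some l
  let hi := match hi with
    | none => some num
    | some h => if num > h then some num else some h
  let top := if num ≥ value then
      (match top with
        | none => some num
        | some t => if num < t then some num else some t)
    else top
  let bottom := if num ≤ value then
      (match bottom with
        | none => some num
        | some b => if num > b then some num else some b)
    else bottom
  (top, bottom, lo, hi)

def find_nearest_top_bottom_alt (value : Int) (lst : List Int) : Int × Int :=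
  let st := lst.foldl (stepB value) (none, none, none, none)
  let top : Int := (st.1).getD ((st.2.2.2).getD 0)      -- if top is None: top = hi
  let bottom : Int := (st.2.1).getD ((st.2.2.1).getD 0) -- if bottom is None: bottom = lo
  (bottom, top)

-- ===== PRECONDITION & SPEC =====
-- Pre_ excludes only the empty list, on which A raises IndexError at lst[-1].
def Pre_find_nearest_top_bottom (value : Int) (lst : List Int) : Prop := lst ≠ []
instance (value : Int) (lst : List Int) : Decidable (Pre_find_nearest_top_bottom value lst) := by
  unfold Pre_find_nearest_top_bottom; infer_instance

def pvWitness_find_nearest_top_bottom : Int × List Int := (5, [3, 7, 1])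

def Spec_find_nearest_top_bottom (value : Int) (lst : List Int) (out : Int × Int) : Prop := out = find_nearest_top_bottom_alt value lst
instance (value : Int) (lst : List Int) (out : Int × Int) : Decidable (Spec_find_nearest_top_bottom value lst out) := by unfold Spec_find_nearest_top_bottom; infer_instance

-- ===== CLAIM (what is proved, stated in full; the proofs are below) =====
def Claim_equal_find_nearest_top_bottom : Prop := ∀ (value : Int) (lst : List Int), Dom_find_nearest_top_bottom value lst → Pre_find_nearest_top_bottom value lst → Spec_find_nearest_top_bottom value lst (find_nearest_top_bottom value lst)

-- ===== LEMMAS AND PROOFS =====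

-- option-valued min/max combinators (none = "no candidate yet")
def omin2 : Option Int → Option Int → Option Int
  | none, b => b
  | some a, none => some a
  | some a, some b => some (min a b)

def omax2 : Option Int → Option Int → Option Int
  | none, b => b
  | some a, none => some a
  | some a, some b => some (max a b)

-- canonical values of the four tracked quantities
def geMin (v : Int) : List Int → Option Int
  | [] => none
  | x :: t => omin2 (if v ≤ x then some x else none) (geMin v t)

def leMax (v : Int) : List Int → Option Int
  | [] => none
  | x :: t => omax2 (if x ≤ v then some x else none) (leMax v t)

def lmin : List Int → Option Int
  | [] => none
  | x :: t => omin2 (some x) (lmin t)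

def lmax : List Int → Option Int
  | [] => none
  | x :: t => omax2 (some x) (lmax t)

theorem omin2_none_left (b : Option Int) : omin2 none b = b := rfl
theorem omax2_none_left (b : Option Int) : omax2 none b = b := rfl

theorem omin2_assoc (a b c : Option Int) : omin2 (omin2 a b) c = omin2 a (omin2 b c) := by
  cases a <;> cases b <;> cases c <;> simp [omin2, min_assoc]

theorem omax2_assoc (a b c : Option Int) : omax2 (omax2 a b) c = omax2 a (omax2 b c) := by
  cases a <;> cases b <;> cases c <;> simp [omax2, max_assoc]

theorem omin2_left_comm (a b c : Option Int) : omin2 a (omin2 b c) = omin2 b (omin2 a c) := by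
  cases a <;> cases b <;> cases c <;> simp [omin2, min_left_comm, min_comm]

theorem omax2_left_comm (a b c : Option Int) : omax2 a (omax2 b c) = omax2 b (omax2 a c) := by
  cases a <;> cases b <;> cases c <;> simp [omax2, max_left_comm, max_comm]

-- membership/bound facts
theorem geMin_mem (v : Int) (l : List Int) (m : Int) (h : geMin v l = some m) : m ∈ l ∧ v ≤ m := by
  induction l generalizing m with
  | nil => simp [geMin] at h
  | cons x t ih =>
    simp only [geMin] at h
    by_cases hx : v ≤ x
    · simp only [if_pos hx] at h
      cases ht : geMin v t with
      | none => rw [ht] at h; simp [omin2] at h; subst h; exact ⟨List.mem_cons_self, hx⟩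
      | some m' =>
        rw [ht] at h; simp [omin2] at h
        have := ih m' ht
        rcases min_cases x m' with ⟨he, _⟩ | ⟨he, _⟩
        · rw [he] at h; subst h; exact ⟨List.mem_cons_self, hx⟩
        · rw [he] at h; subst h; exact ⟨List.mem_cons_of_mem _ this.1, this.2⟩
    · simp only [if_neg hx, omin2_none_left] at h
      have := ih m h
      exact ⟨List.mem_cons_of_mem _ this.1, this.2⟩

theorem leMax_mem (v : Int) (l : List Int) (m : Int) (h : leMax v l = some m) : m ∈ l ∧ m ≤ v := by
  induction l generalizing m with
  | nil => simp [leMax] at h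
  | cons x t ih =>
    simp only [leMax] at h
    by_cases hx : x ≤ v
    · simp only [if_pos hx] at h
      cases ht : leMax v t with
      | none => rw [ht] at h; simp [omax2] at h; subst h; exact ⟨List.mem_cons_self, hx⟩
      | some m' =>
        rw [ht] at h; simp [omax2] at h
        have := ih m' ht
        rcases max_cases x m' with ⟨he, _⟩ | ⟨he, _⟩
        · rw [he] at h; subst h; exact ⟨List.mem_cons_self, hx⟩
        · rw [he] at h; subst h; exact ⟨List.mem_cons_of_mem _ this.1, this.2⟩
    · simp only [if_neg hx, omax2_none_left] at h
      have := ih m h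
      exact ⟨List.mem_cons_of_mem _ this.1, this.2⟩

theorem lmin_mem (l : List Int) (m : Int) (h : lmin l = some m) : m ∈ l := by
  induction l generalizing m with
  | nil => simp [lmin] at h
  | cons x t ih =>
    simp only [lmin] at h
    cases ht : lmin t with
    | none => rw [ht] at h; simp [omin2] at h; subst h; exact List.mem_cons_self
    | some m' =>
      rw [ht] at h; simp [omin2] at h
      rcases min_cases x m' with ⟨he, _⟩ | ⟨he, _⟩
      · rw [he] at h; subst h; exact List.mem_cons_self
      · rw [he] at h; subst h; exact List.mem_cons_of_mem _ (ih m' ht)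

-- permutation invariance (all four are folds of a commutative idempotent-free combine)
theorem geMin_perm (v : Int) {l₁ l₂ : List Int} (hp : l₁.Perm l₂) : geMin v l₁ = geMin v l₂ := by
  induction hp with
  | nil => rfl
  | cons x _ ih => simp [geMin, ih]
  | swap x y l => simp [geMin, omin2_left_comm]
  | trans _ _ ih₁ ih₂ => exact ih₁.trans ih₂

theorem leMax_perm (v : Int) {l₁ l₂ : List Int} (hp : l₁.Perm l₂) : leMax v l₁ = leMax v l₂ := by
  induction hp with
  | nil => rfl
  | cons x _ ih => simp [leMax, ih]
  | swap x y l => simp [leMax, omax2_left_comm]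
  | trans _ _ ih₁ ih₂ => exact ih₁.trans ih₂

theorem lmin_perm {l₁ l₂ : List Int} (hp : l₁.Perm l₂) : lmin l₁ = lmin l₂ := by
  induction hp with
  | nil => rfl
  | cons x _ ih => simp [lmin, ih]
  | swap x y l => simp [lmin, omin2_left_comm]
  | trans _ _ ih₁ ih₂ => exact ih₁.trans ih₂

theorem lmax_perm {l₁ l₂ : List Int} (hp : l₁.Perm l₂) : lmax l₁ = lmax l₂ := by
  induction hp with
  | nil => rfl
  | cons x _ ih => simp [lmax, ih]
  | swap x y l => simp [lmax, omax2_left_comm]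
  | trans _ _ ih₁ ih₂ => exact ih₁.trans ih₂

-- A's forward scan over an ascending list computes geMin
theorem findGeA_sorted (v : Int) (l : List Int) (h : l.Pairwise (· ≤ ·)) :
    findGeA v l = geMin v l := by
  induction l with
  | nil => rfl
  | cons x t ih =>
    rcases List.pairwise_cons.mp h with ⟨hx, ht⟩
    by_cases hvx : v ≤ x
    · simp only [findGeA, geMin, ge_iff_le, if_pos hvx]
      cases hg : geMin v t with
      | none => simp [omin2]
      | some m =>
        have hm := geMin_mem v t m hg
        simp [omin2, min_eq_left (hx m hm.1)]
    · simp only [findGeA, geMin, ge_iff_le, if_neg hvx, omin2_none_left]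
      exact ih ht

-- A's backward scan over a descending list computes leMax
theorem findLeA_sortedRev (v : Int) (l : List Int) (h : l.Pairwise (fun a b => b ≤ a)) :
    findLeA v l = leMax v l := by
  induction l with
  | nil => rfl
  | cons x t ih =>
    rcases List.pairwise_cons.mp h with ⟨hx, ht⟩
    by_cases hvx : x ≤ v
    · simp only [findLeA, leMax, if_pos hvx]
      cases hg : leMax v t with
      | none => simp [omax2]
      | some m =>
        have hm := leMax_mem v t m hg
        simp [omax2, max_eq_left (hx m hm.1)]
    · simp only [findLeA, leMax, if_neg hvx, omax2_none_left]
      exact ih ht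

-- head / last of an ascending list are its min / max
theorem lmin_sorted (x : Int) (t : List Int) (h : (x :: t).Pairwise (· ≤ ·)) :
    lmin (x :: t) = some x := by
  rcases List.pairwise_cons.mp h with ⟨hx, _⟩
  simp only [lmin]
  cases ht : lmin t with
  | none => rfl
  | some m =>
    have hm := lmin_mem t m ht
    simp [omin2, min_eq_left (hx m hm)]

theorem lmax_sorted (l : List Int) (h : l.Pairwise (· ≤ ·)) (hne : l ≠ []) :
    lmax l = some (l.getLast hne) := by
  induction l with
  | nil => exact absurd rfl hne
  | cons x t ih =>
    rcases List.pairwise_cons.mp h with ⟨hx, ht⟩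
    cases t with
    | nil => rfl
    | cons y u =>
      have hne' : y :: u ≠ [] := by simp
      have hmem : (y :: u).getLast hne' ∈ y :: u := List.getLast_mem hne'
      rw [show lmax (x :: y :: u) = omax2 (some x) (lmax (y :: u)) from rfl, ih ht hne']
      simp [omax2, max_eq_right (hx _ hmem), List.getLast_cons hne']

-- one step of B's loop, algebraically
set_option maxHeartbeats 1000000 in
theorem stepB_eq (v : Int) (top bottom lo hi : Option Int) (x : Int) :
    stepB v (top, bottom, lo, hi) x =
      (omin2 top (if v ≤ x then some x else none),
       omax2 bottom (if x ≤ v then some x else none),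
       omin2 lo (some x), omax2 hi (some x)) := by
  cases top <;> cases bottom <;> cases lo <;> cases hi <;>
    simp [stepB, omin2, omax2, min_def, max_def] <;> split_ifs <;> simp_all <;> omega

-- B's whole fold, by the invariant over an arbitrary start state
theorem foldB (v : Int) (l : List Int) (top bottom lo hi : Option Int) :
    l.foldl (stepB v) (top, bottom, lo, hi) =
      (omin2 top (geMin v l), omax2 bottom (leMax v l),
       omin2 lo (lmin l), omax2 hi (lmax l)) := by
  induction l generalizing top bottom lo hi with
  | nil => cases top <;> cases bottom <;> cases lo <;> cases hi <;> rfl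
  | cons x t ih =>
    simp only [List.foldl_cons, stepB_eq, ih, geMin, leMax, lmin, lmax,
      omin2_assoc, omax2_assoc]

-- ===== VERDICT (by name: the statement is the Claim_ definition above) =====
theorem find_nearest_top_bottom_spec : Claim_equal_find_nearest_top_bottom := by
  intro value lst _ hpre
  unfold Spec_find_nearest_top_bottom
  unfold find_nearest_top_bottom find_nearest_top_bottom_alt
  have hperm : (PySem.List.sorted lst (fun x => x) false).Perm lst :=
    PySem.List.sorted_perm lst (fun x => x) false
  set s := PySem.List.sorted lst (fun x => x) false with hs
  have hsne : s ≠ [] := by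
    intro h; rw [h] at hperm; exact hpre hperm.symm.eq_nil
  have hpair : s.Pairwise (· ≤ ·) := by
    simpa using (PySem.List.sorted_pairwise (xs := lst) (key := fun x => x))
  simp only [foldB, omin2_none_left, omax2_none_left]
  have hge : findGeA value s = geMin value lst :=
    (findGeA_sorted value s hpair).trans (geMin_perm value hperm)
  have hle : findLeA value s.reverse = leMax value lst := by
    have h1 : findLeA value s.reverse = leMax value s.reverse :=
      findLeA_sortedRev value s.reverse (by simpa using (List.pairwise_reverse).mpr hpair)
    exact h1.trans (leMax_perm value ((s.reverse_perm).trans hperm))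
  rw [hge, hle]
  congr 1
  · -- bottoms
    cases hb : leMax value lst with
    | some m => simp
    | none =>
      simp only [Option.getD_none]
      obtain ⟨x, t, hxt⟩ := List.exists_cons_of_ne_nil hsne
      have hmin : lmin lst = some x := by
        rw [← lmin_perm hperm, hxt]
        exact lmin_sorted x t (hxt ▸ hpair)
      rw [hmin]
      simp [PySem.List.pyGetD_zero, hxt]
  · -- tops
    cases hg : geMin value lst with
    | some m => simp
    | none =>
      simp only [Option.getD_none]
      have hmax : lmax lst = some (s.getLast hsne) := by
        rw [← lmax_perm hperm]
        exact lmax_sorted s hpair hsne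
      rw [hmax]
      exact PySem.List.pyGetD_neg_one s 0 hsne
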